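-- pv_equiv track=rewrite | github.com/yuvraj-ti/yuvraj-jtu-22-logging-and-exception-management-assignment | fast_api_als/services/enrich/customer_info.py | check_alpha_and_numeric_address
-- ===== SOURCE A (Python) =====
-- def check_alpha_and_numeric_address(address):
--     numeric = any(map(str.isdigit, address))
--     alpha = False
--     for c in address:
--         if ('a' <= c <= 'z') or ('A' <= c <= 'Z'):
--             alpha = True
--     if numeric and alpha:
--         return 1
--     return 0
-- ===== SOURCE B (Python) =====
-- def check_alpha_and_numeric_address(address):
--     # Divide and conquer: mask(lo, hi) is the bitwise OR of per-character class
--     # masks over address[lo:hi]: bit 1 = digit (c.isdigit()), bit 2 = ASCII letter.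
--     def mask(lo, hi):
--         if hi - lo == 0:
--             return 0
--         if hi - lo == 1:
--             c = address[lo]
--             m = 1 if c.isdigit() else 0
--             if 'a' <= c <= 'z' or 'A' <= c <= 'Z':
--                 m |= 2
--             return m
--         mid = (lo + hi) // 2
--         return mask(lo, mid) | mask(mid, hi)
--     return 1 if mask(0, len(address)) == 3 else 0
-- ===== Notes on version B (the rewrite author's own statement) =====
-- stated objective: alternative
-- what changed: A makes two sequential linear flag-scans (any(map(str.isdigit,...)) then a letter loop); B is a divide-and-conquer map-reduce: each character is mapped to a 2-bit class mask (digit bit, ASCII-letter bit), halves are combined with bitwise OR, and the result is 1 iff the root mask equals 3.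
import Mathlib
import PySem

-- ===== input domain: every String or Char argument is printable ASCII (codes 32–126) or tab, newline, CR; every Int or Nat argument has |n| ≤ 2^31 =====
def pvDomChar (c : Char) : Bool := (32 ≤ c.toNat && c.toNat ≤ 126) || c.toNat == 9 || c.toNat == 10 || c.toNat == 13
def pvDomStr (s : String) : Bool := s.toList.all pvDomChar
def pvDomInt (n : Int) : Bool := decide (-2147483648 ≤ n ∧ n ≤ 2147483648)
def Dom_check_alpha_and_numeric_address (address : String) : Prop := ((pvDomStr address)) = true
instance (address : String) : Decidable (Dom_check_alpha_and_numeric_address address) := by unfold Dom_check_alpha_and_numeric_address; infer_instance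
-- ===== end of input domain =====

-- B replaces A's two sequential flag-scans by a divide-and-conquer map-reduce:
-- per-char 2-bit class masks combined with bitwise OR; answer 1 iff the root mask is 3.

-- ===== PORT A =====
def check_alpha_and_numeric_address (address : String) : Int :=
  let numeric := address.toList.any PySem.Chars.isdigit
  let alpha := address.toList.foldl
    (fun alpha c => if ('a' ≤ c ∧ c ≤ 'z') ∨ ('A' ≤ c ∧ c ≤ 'Z') then true else alpha) false
  if numeric && alpha then 1 else 0

-- ===== PORT B =====
-- per-character class mask of Source B: bit 1 = digit, bit 2 = ASCII letter
def pvCharMask (c : Char) : Nat :=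
  let m := if PySem.Chars.isdigit c then 1 else 0
  if ('a' ≤ c ∧ c ≤ 'z') ∨ ('A' ≤ c ∧ c ≤ 'Z') then m ||| 2 else m

-- Source B's mask(lo, hi) on the slice, as recursion on the char list (halving at length/2)
def pvMaskB : List Char → Nat
  | [] => 0
  | [c] => pvCharMask c
  | c1 :: c2 :: rest =>
    let cs := c1 :: c2 :: rest
    let mid := cs.length / 2
    pvMaskB (cs.take mid) ||| pvMaskB (cs.drop mid)
termination_by cs => cs.length
decreasing_by
  all_goals simp [List.length_take, List.length_drop]; omega

def check_alpha_and_numeric_address_alt (address : String) : Int :=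
  if pvMaskB address.toList == 3 then 1 else 0

-- ===== PRECONDITION & SPEC =====
def Spec_check_alpha_and_numeric_address (address : String) (out : Int) : Prop := out = check_alpha_and_numeric_address_alt address
instance (address : String) (out : Int) : Decidable (Spec_check_alpha_and_numeric_address address out) := by unfold Spec_check_alpha_and_numeric_address; infer_instance

-- ===== CLAIM (what is proved, stated in full; the proofs are below) =====
def Claim_equal_check_alpha_and_numeric_address : Prop := ∀ (address : String), Dom_check_alpha_and_numeric_address address → Spec_check_alpha_and_numeric_address address (check_alpha_and_numeric_address address)

-- ===== LEMMAS AND PROOFS =====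

def pvLetter (c : Char) : Bool := decide (('a' ≤ c ∧ c ≤ 'z') ∨ ('A' ≤ c ∧ c ≤ 'Z'))

lemma pvMask_or (d1 l1 d2 l2 : Bool) :
    (((if d1 then 1 else 0) ||| (if l1 then 2 else 0)) |||
     ((if d2 then 1 else 0) ||| (if l2 then 2 else 0)))
      = ((if d1 || d2 then 1 else 0) ||| (if l1 || l2 then (2:Nat) else 0)) := by
  cases d1 <;> cases l1 <;> cases d2 <;> cases l2 <;> decide

lemma pvMaskB_eq (cs : List Char) :
    pvMaskB cs = (if cs.any PySem.Chars.isdigit then 1 else 0) ||| (if cs.any pvLetter then 2 else 0) := by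
  induction cs using pvMaskB.induct with
  | case1 => simp [pvMaskB]
  | case2 c =>
    simp only [pvMaskB, pvCharMask, pvLetter, List.any_cons, List.any_nil, Bool.or_false]
    by_cases hd : PySem.Chars.isdigit c = true <;>
      by_cases hl : ('a' ≤ c ∧ c ≤ 'z') ∨ ('A' ≤ c ∧ c ≤ 'Z') <;>
        simp [hd, hl]
  | case3 c1 c2 rest _cs _mid ih1 ih2 =>
    rw [pvMaskB, ih1, ih2, pvMask_or,
        ← List.any_append, ← List.any_append, List.take_append_drop]

lemma pvFoldl_alpha (cs : List Char) : ∀ a : Bool,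
    cs.foldl (fun alpha c => if ('a' ≤ c ∧ c ≤ 'z') ∨ ('A' ≤ c ∧ c ≤ 'Z') then true else alpha) a
      = (a || cs.any pvLetter) := by
  induction cs with
  | nil => intro a; simp
  | cons c cs ih =>
    intro a
    simp only [List.foldl_cons, List.any_cons, ih, pvLetter]
    by_cases hl : ('a' ≤ c ∧ c ≤ 'z') ∨ ('A' ≤ c ∧ c ≤ 'Z') <;> simp [hl]

-- ===== VERDICT (by name: the statement is the Claim_ definition above) =====
theorem check_alpha_and_numeric_address_spec : Claim_equal_check_alpha_and_numeric_address := by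
  intro address _
  unfold Spec_check_alpha_and_numeric_address check_alpha_and_numeric_address check_alpha_and_numeric_address_alt
  rw [pvMaskB_eq, pvFoldl_alpha]
  cases address.toList.any PySem.Chars.isdigit <;> cases address.toList.any pvLetter <;> simp
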